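-- pv_equiv track=rewrite | github.com/jasdestiny0/Competitive-Coding | Algorithms/Dynamic Programming/Cell mitiosis/solution.py | cellMitiosis
-- ===== SOURCE A (Python) =====
-- def cellMitiosis(n,x,y,z):
--     dp = dict()
--
--     # Base case
--     dp[0] = 0
--     dp[1] = 0
--
--     #Remaining cases
--     for i in range(2,n+1):
--         ans = 0
--         if i%2 == 0:
--             ans = min((dp[i//2]+x),(dp[i-1]+y))
--         else:
--             ans = min((dp[i-1]+y),(dp[(i+1)//2]+x+z))
--
--         dp[i] = ans
--
--     return dp[n]
-- ===== SOURCE B (Python) =====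
-- def _relax(best, n, j, v):
--     # record candidate cost v for cell count j (forward edge relaxation)
--     if j <= n and (best[j] is None or v < best[j]):
--         best[j] = v
--
--
-- def cellMitiosis(n, x, y, z):
--     # Forward ("push") DP: each reached count i relaxes its outgoing moves
--     # i -> i+1 (cost y), i -> 2i (cost x), i -> 2i-1 (cost x+z, i >= 2).
--     if n <= 1:
--         return 0
--     best = [None] * (n + 1)
--     best[0] = 0
--     best[1] = 0
--     for i in range(1, n + 1):
--         b = best[i]
--         _relax(best, n, i + 1, b + y)
--         _relax(best, n, 2 * i, b + x)
--         if i >= 2: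
--             _relax(best, n, 2 * i - 1, b + x + z)
--     return best[n]
-- ===== Notes on version B (the rewrite author's own statement) =====
-- stated objective: alternative
-- what changed: Replaces the backward pull-DP over a dict (each cell count i reads dp[i//2]/dp[(i+1)//2]/dp[i-1]) by a forward push-DP over an array: each reached count i relaxes its outgoing moves i->i+1 (+y), i->2i (+x), i->2i-1 (+x+z), so every cell's value is the min over its incoming relaxations.
import Mathlib
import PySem

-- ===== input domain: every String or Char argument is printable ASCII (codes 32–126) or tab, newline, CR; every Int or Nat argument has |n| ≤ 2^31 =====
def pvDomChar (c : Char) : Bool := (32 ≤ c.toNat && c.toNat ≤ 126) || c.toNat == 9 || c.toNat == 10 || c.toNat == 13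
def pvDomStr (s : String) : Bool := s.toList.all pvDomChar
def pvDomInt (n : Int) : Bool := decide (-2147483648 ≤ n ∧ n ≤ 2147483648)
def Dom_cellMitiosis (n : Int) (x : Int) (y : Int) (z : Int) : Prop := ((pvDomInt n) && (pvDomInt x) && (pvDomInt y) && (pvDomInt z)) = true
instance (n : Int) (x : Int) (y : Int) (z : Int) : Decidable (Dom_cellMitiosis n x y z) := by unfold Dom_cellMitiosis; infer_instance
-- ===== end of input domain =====

-- B replaces A's backward pull-DP over a dict by a forward push-DP over an array
-- (each reached count relaxes its three outgoing moves); same cost, different traversal.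


-- ===== PORT A =====
-- Python's dp is a dict whose keys are exactly 0,1,…,i in insertion order, so it is
-- ported as the array of its values: dp[k] reads arr[k] (the keys looked up — i//2,
-- (i+1)//2, i-1 — are always present and nonnegative, so `getD _ 0`/`.toNat` are exact),
-- and dp[i] = ans (always a fresh key) appends
def stepA (x : Int) (y : Int) (z : Int) (dp : Array Int) (i : Int) : Array Int :=
  let ans : Int :=
    if PySem.Int.mod i 2 = 0 then
      min (dp.getD (PySem.Int.floordiv i 2).toNat 0 + x) (dp.getD (i - 1).toNat 0 + y)
    else
      min (dp.getD (i - 1).toNat 0 + y) (dp.getD (PySem.Int.floordiv (i + 1) 2).toNat 0 + x + z)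
  dp.push ans

def cellMitiosis (n : Int) (x : Int) (y : Int) (z : Int) : Int :=
  let dp : Array Int := (Array.empty.push 0).push 0   -- dp[0] = 0; dp[1] = 0
  let dp := (PySem.List.pyRange 2 (n + 1) 1).foldl (stepA x y z) dp
  dp.getD n.toNat 0   -- dp[n]; only for n < 0 Python raises KeyError — excluded by Pre_

-- ===== PORT B =====
-- Python's  best[j] is None or v < best[j]
def pvNoneOrLt (o : Option Int) (v : Int) : Bool :=
  match o with
  | none => true
  | some w => decide (v < w)

-- _relax of Source B; every j it is called with satisfies 2 ≤ j, so j.toNat is exact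
def pvRelaxCell (best : Array (Option Int)) (n : Int) (j : Int) (v : Int) : Array (Option Int) :=
  if decide (j ≤ n) && pvNoneOrLt (best.getD j.toNat none) v then
    best.setIfInBounds j.toNat (some v)
  else best

-- loop body of Source B; best[i] is provably never None when it is read (cell i was relaxed
-- from i-1 before), so the `none` branch is unreachable and only keeps the port total
def stepB (n : Int) (x : Int) (y : Int) (z : Int) (best : Array (Option Int)) (i : Int) : Array (Option Int) :=
  match best.getD i.toNat none with
  | none => best
  | some b =>
    let best := pvRelaxCell best n (i + 1) (b + y)
    let best := pvRelaxCell best n (2 * i) (b + x)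
    if 2 ≤ i then pvRelaxCell best n (2 * i - 1) (b + x + z) else best

def cellMitiosis_alt (n : Int) (x : Int) (y : Int) (z : Int) : Int :=
  if n ≤ 1 then 0
  else
    let best : Array (Option Int) :=
      ((Array.replicate (n + 1).toNat (none : Option Int)).setIfInBounds 0 (some 0)).setIfInBounds 1 (some 0)
    let best := (PySem.List.pyRange 1 (n + 1) 1).foldl (stepB n x y z) best
    match best.getD n.toNat none with
    | some v => v
    | none => 0   -- unreachable for n ≥ 2

-- ===== PRECONDITION & SPEC =====
-- Pre_ excludes exactly n < 0, where the Python A raises KeyError (dp[n] was never filled)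
def Pre_cellMitiosis (n : Int) (x : Int) (y : Int) (z : Int) : Prop := 0 ≤ n
instance (n : Int) (x : Int) (y : Int) (z : Int) : Decidable (Pre_cellMitiosis n x y z) := by unfold Pre_cellMitiosis; infer_instance

def pvWitness_cellMitiosis : Int × Int × Int × Int := (5, 2, 3, 1)

def Spec_cellMitiosis (n : Int) (x : Int) (y : Int) (z : Int) (out : Int) : Prop := out = cellMitiosis_alt n x y z
instance (n : Int) (x : Int) (y : Int) (z : Int) (out : Int) : Decidable (Spec_cellMitiosis n x y z out) := by unfold Spec_cellMitiosis; infer_instance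

-- ===== CLAIM (what is proved, stated in full; the proofs are below) =====
def Claim_equal_cellMitiosis : Prop := ∀ (n : Int) (x : Int) (y : Int) (z : Int), Dom_cellMitiosis n x y z → Pre_cellMitiosis n x y z → Spec_cellMitiosis n x y z (cellMitiosis n x y z)
-- ===== LEMMAS AND PROOFS =====

def cellRec (x : Int) (y : Int) (z : Int) : Nat → Int
  | 0 => 0
  | 1 => 0
  | k + 2 =>
    if (k + 2) % 2 = 0 then
      min (cellRec x y z ((k + 2) / 2) + x) (cellRec x y z (k + 1) + y)
    else
      min (cellRec x y z (k + 1) + y) (cellRec x y z ((k + 3) / 2) + x + z)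
  decreasing_by all_goals omega

lemma cellRec_ge_two (x y z : Int) (j : Nat) (h : 2 ≤ j) :
    cellRec x y z j =
      if j % 2 = 0 then min (cellRec x y z (j / 2) + x) (cellRec x y z (j - 1) + y)
      else min (cellRec x y z (j - 1) + y) (cellRec x y z ((j + 1) / 2) + x + z) := by
  obtain ⟨k, rfl⟩ : ∃ k, j = k + 2 := ⟨j - 2, by omega⟩
  rw [cellRec]
  congr 2

lemma cellRec_zero (x y z : Int) : cellRec x y z 0 = 0 := by simp [cellRec]
lemma cellRec_one (x y z : Int) : cellRec x y z 1 = 0 := by simp [cellRec]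

def arrA (x y z : Int) (m : Nat) : Array Int :=
  (PySem.List.pyRange 2 (2 + (m : Int)) 1).foldl (stepA x y z) ((Array.empty.push 0).push 0)

lemma arrA_succ (x y z : Int) (m : Nat) :
    arrA x y z (m + 1) = stepA x y z (arrA x y z m) (2 + (m : Int)) := by
  unfold arrA
  rw [show (2 + ((m + 1 : Nat) : Int)) = (2 + (m : Int)) + 1 from by push_cast; ring,
      PySem.List.pyRange_one_succ_right (by omega), List.foldl_append]
  rfl

lemma arrA_get (x y z : Int) (m : Nat) :
    (arrA x y z m).size = m + 2 ∧
      ∀ j : Nat, j ≤ m + 1 → (arrA x y z m).getD j 0 = cellRec x y z j := by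
  induction m with
  | zero =>
    have h0 : arrA x y z 0 = (Array.empty.push 0).push 0 := by
      unfold arrA
      rw [show (2 + ((0 : Nat) : Int)) = 2 from by norm_num,
          PySem.List.pyRange_one_eq_nil (by norm_num)]
      rfl
    rw [h0]
    refine ⟨rfl, fun j hj => ?_⟩
    interval_cases j
    · rw [cellRec_zero]; rfl
    · rw [cellRec_one]; rfl
  | succ m ih =>
    obtain ⟨ihs, ihg⟩ := ih
    rw [arrA_succ]
    unfold stepA
    have hk : (2 + (m : Int)) = ((m + 2 : Nat) : Int) := by push_cast; ring
    have hfd : (PySem.Int.floordiv ((m + 2 : Nat) : Int) 2).toNat = (m + 2) / 2 := by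
      rw [show PySem.Int.floordiv ((m + 2 : Nat) : Int) 2 = (((m + 2) / 2 : Nat) : Int) from by
            exact_mod_cast PySem.Int.floordiv_natCast (m + 2) 2]
      omega
    have h1 : (((m + 2 : Nat) : Int) - 1).toNat = m + 1 := by omega
    have hfd3 : (PySem.Int.floordiv (((m + 2 : Nat) : Int) + 1) 2).toNat = (m + 3) / 2 := by
      rw [show (((m + 2 : Nat) : Int) + 1) = ((m + 3 : Nat) : Int) from by push_cast; ring,
          show PySem.Int.floordiv ((m + 3 : Nat) : Int) 2 = (((m + 3) / 2 : Nat) : Int) from by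
            exact_mod_cast PySem.Int.floordiv_natCast (m + 3) 2]
      omega
    have hmod : PySem.Int.mod ((m + 2 : Nat) : Int) 2 = (((m + 2) % 2 : Nat) : Int) := by
      exact_mod_cast PySem.Int.mod_natCast (m + 2) 2
    rw [hk, hfd, h1, hfd3, hmod, ihg ((m + 2) / 2) (by omega), ihg (m + 1) (by omega),
        ihg ((m + 3) / 2) (by omega)]
    refine ⟨by rw [Array.size_push, ihs], fun j hj => ?_⟩
    rw [Array.getD_eq_getD_getElem?, Array.getElem?_push, ihs]
    by_cases hjm : j = m + 2
    · rw [if_pos hjm, hjm, cellRec_ge_two x y z (m + 2) (by omega)]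
      have : ((((m + 2) % 2 : Nat) : Int) = 0) ↔ ((m + 2) % 2 = 0) := by exact_mod_cast Iff.rfl
      rw [show (m + 2 - 1) = m + 1 from rfl, show (m + 2 + 1) / 2 = (m + 3) / 2 from rfl]
      split_ifs with ha hb hb
      · rfl
      · omega
      · omega
      · rfl
    · rw [if_neg hjm, ← Array.getD_eq_getD_getElem?]
      exact ihg j (by omega)

def optMin (o : Option Int) (v : Int) : Int :=
  match o with
  | none => v
  | some w => min w v

def pcell (x y z : Int) (i j : Nat) : Option Int :=
  if j - 1 ≤ i then some (cellRec x y z j)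
  else if (j + 1) / 2 ≤ i then
    some (if j % 2 = 0 then cellRec x y z ((j + 1) / 2) + x else cellRec x y z ((j + 1) / 2) + x + z)
  else none

lemma size_pvRelaxCell (best : Array (Option Int)) (n j v : Int) :
    (pvRelaxCell best n j v).size = best.size := by
  unfold pvRelaxCell
  split_ifs <;> simp

lemma pvRelaxCell_getD (best : Array (Option Int)) (n j v : Int)
    (hlen : best.size = (n + 1).toNat) (h2 : 2 ≤ j) (k : Nat) (hk : (k : Int) ≤ n) :
    (pvRelaxCell best n j v).getD k none =
      if (k : Int) = j then some (optMin (best.getD k none) v) else best.getD k none := by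
  unfold pvRelaxCell
  by_cases hjn : j ≤ n
  · have hlt : j.toNat < best.size := by omega
    cases hg : best.getD j.toNat none with
    | none =>
      rw [if_pos (by simp [pvNoneOrLt, hjn])]
      by_cases hkj : k = j.toNat
      · rw [Array.getD_eq_getD_getElem?, Array.getElem?_setIfInBounds, if_pos hkj.symm, if_pos hlt,
            if_pos (by omega : ((k : Int) = j)), hkj, hg]
        rfl
      · rw [Array.getD_eq_getD_getElem?, Array.getElem?_setIfInBounds, if_neg (fun h => hkj h.symm),
            if_neg (by omega : ¬ (k : Int) = j)]
        exact (Array.getD_eq_getD_getElem?).symm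
    | some w =>
      by_cases hvw : v < w
      · rw [if_pos (by simp [pvNoneOrLt, hjn, hvw])]
        by_cases hkj : k = j.toNat
        · rw [Array.getD_eq_getD_getElem?, Array.getElem?_setIfInBounds, if_pos hkj.symm, if_pos hlt,
              if_pos (by omega : ((k : Int) = j)), hkj, hg]
          simp [optMin, min_eq_right (le_of_lt hvw)]
        · rw [Array.getD_eq_getD_getElem?, Array.getElem?_setIfInBounds, if_neg (fun h => hkj h.symm),
              if_neg (by omega : ¬ (k : Int) = j)]
          exact (Array.getD_eq_getD_getElem?).symm
      · rw [if_neg (by simp [pvNoneOrLt, hvw])]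
        by_cases hkj : k = j.toNat
        · rw [if_pos (by omega : ((k : Int) = j)), hkj, hg]
          simp [optMin, min_eq_left (le_of_not_gt hvw)]
        · rw [if_neg (by omega : ¬ (k : Int) = j)]
  · rw [if_neg (by simp [hjn]), if_neg (by omega : ¬ (k : Int) = j)]

lemma pcell_succ (x y z : Int) (s : Nat) (hs : 1 ≤ s) (k : Nat) :
    pcell x y z s k =
      (let g0 := pcell x y z (s - 1) k
       let g1 := if k = s + 1 then some (optMin g0 (cellRec x y z s + y)) else g0
       let g2 := if k = 2 * s then some (optMin g1 (cellRec x y z s + x)) else g1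
       if 2 ≤ s ∧ k = 2 * s - 1 then some (optMin g2 (cellRec x y z s + x + z)) else g2) := by
  by_cases hk1 : k = s + 1
  · subst hk1
    by_cases hs1 : s = 1
    · subst hs1
      simp only [pcell, optMin]
      split_ifs <;>
        first
        | omega
        | (simp only [and_true] at *; omega)
        | (rw [cellRec_ge_two x y z 2 (by norm_num), if_pos (by norm_num : 2 % 2 = 0)]
           exact congrArg some (min_comm _ _))
    · by_cases hs2 : s = 2
      · subst hs2
        simp only [pcell, optMin]
        split_ifs <;>
          first
          | omega
          | (simp only [and_true] at *; omega)
          | (rw [cellRec_ge_two x y z 3 (by norm_num), if_neg (by norm_num : ¬ 3 % 2 = 0)]; try rfl)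
      · have h3 : 3 ≤ s := by omega
        simp only [pcell, optMin]
        split_ifs <;>
          first
          | omega
          | (simp only [and_true] at *; omega)
          | (rw [cellRec_ge_two x y z (s + 1) (by omega), if_pos (by omega),
                 show (s + 1 + 1) / 2 = (s + 1) / 2 from by omega]
             rfl)
          | (rw [cellRec_ge_two x y z (s + 1) (by omega), if_neg (by omega)]
             exact congrArg some (min_comm _ _))
  · by_cases hk2 : k = 2 * s
    · subst hk2
      have h2 : 2 ≤ s := by omega
      simp only [pcell, optMin]
      split_ifs <;>
        first
        | omega
        | (simp only [and_true] at *; omega)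
        | (rw [show (2 * s + 1) / 2 = s from by omega]; try rfl)
    · by_cases hk3 : 2 ≤ s ∧ k = 2 * s - 1
      · obtain ⟨h2, hk3⟩ := hk3
        subst hk3
        have h3 : 3 ≤ s := by omega
        simp only [pcell, optMin]
        split_ifs <;>
          first
          | omega
          | (simp only [and_true] at *; omega)
          | (rw [show (2 * s - 1 + 1) / 2 = s from by omega]; try rfl)
      · simp only [pcell, optMin]
        rw [if_neg hk3, if_neg hk2, if_neg hk1]
        split_ifs <;> first | rfl | omega

lemma stepB_getD (n x y z : Int) (m : Nat) (best : Array (Option Int))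
    (hlen : best.size = (n + 1).toNat)
    (hinv : ∀ k : Nat, (k : Int) ≤ n → best.getD k none = pcell x y z m k)
    (hs : (m : Int) + 1 ≤ n) :
    (stepB n x y z best ((m : Int) + 1)).size = (n + 1).toNat ∧
    ∀ k : Nat, (k : Int) ≤ n →
      (stepB n x y z best ((m : Int) + 1)).getD k none = pcell x y z (m + 1) k := by
  have hb : best.getD ((m : Int) + 1).toNat none = some (cellRec x y z (m + 1)) := by
    rw [show ((m : Int) + 1).toNat = m + 1 from by omega, hinv (m + 1) (by omega)]
    unfold pcell
    rw [if_pos (by omega)]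
  unfold stepB
  rw [hb]
  dsimp only
  constructor
  · by_cases h2s : 2 ≤ (m : Int) + 1
    · rw [if_pos h2s, size_pvRelaxCell, size_pvRelaxCell, size_pvRelaxCell, hlen]
    · rw [if_neg h2s, size_pvRelaxCell, size_pvRelaxCell, hlen]
  · intro k hk
    have hlen1 : (pvRelaxCell best n ((m : Int) + 1 + 1) (cellRec x y z (m + 1) + y)).size = (n + 1).toNat := by
      rw [size_pvRelaxCell, hlen]
    have hlen2 : (pvRelaxCell (pvRelaxCell best n ((m : Int) + 1 + 1) (cellRec x y z (m + 1) + y)) n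
        (2 * ((m : Int) + 1)) (cellRec x y z (m + 1) + x)).size = (n + 1).toNat := by
      rw [size_pvRelaxCell, hlen1]
    rw [pcell_succ x y z (m + 1) (by omega) k]
    simp only [Nat.add_sub_cancel]
    by_cases h2s : 2 ≤ (m : Int) + 1
    · rw [if_pos h2s,
          pvRelaxCell_getD _ n (2 * ((m : Int) + 1) - 1) _ hlen2 (by omega) k hk,
          pvRelaxCell_getD _ n _ _ hlen1 (by omega) k hk,
          pvRelaxCell_getD _ n _ _ hlen (by omega) k hk,
          hinv k hk]
      simp only [show ((k : Int) = 2 * ((m : Int) + 1) - 1) ↔ (k = 2 * (m + 1) - 1) from by omega,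
                 show ((k : Int) = 2 * ((m : Int) + 1)) ↔ (k = 2 * (m + 1)) from by omega,
                 show ((k : Int) = (m : Int) + 1 + 1) ↔ (k = m + 1 + 1) from by omega,
                 show ((2 ≤ m + 1) ∧ k = 2 * (m + 1) - 1) ↔ (k = 2 * (m + 1) - 1) from by omega]
    · rw [if_neg h2s,
          pvRelaxCell_getD _ n _ _ hlen1 (by omega) k hk,
          pvRelaxCell_getD _ n _ _ hlen (by omega) k hk,
          hinv k hk]
      rw [if_neg (by omega : ¬ (2 ≤ m + 1 ∧ k = 2 * (m + 1) - 1))]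
      simp only [show ((k : Int) = 2 * ((m : Int) + 1)) ↔ (k = 2 * (m + 1)) from by omega,
                 show ((k : Int) = (m : Int) + 1 + 1) ↔ (k = m + 1 + 1) from by omega]

def bestB (n x y z : Int) (m : Nat) : Array (Option Int) :=
  (PySem.List.pyRange 1 (1 + (m : Int)) 1).foldl (stepB n x y z)
    (((Array.replicate (n + 1).toNat (none : Option Int)).setIfInBounds 0 (some 0)).setIfInBounds 1 (some 0))


lemma bestB_succ (n x y z : Int) (m : Nat) :
    bestB n x y z (m + 1) = stepB n x y z (bestB n x y z m) ((m : Int) + 1) := by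
  unfold bestB
  rw [show (1 + ((m + 1 : Nat) : Int)) = (1 + (m : Int)) + 1 from by push_cast; ring,
      PySem.List.pyRange_one_succ_right (by omega), List.foldl_append,
      show (1 + (m : Int)) = (m : Int) + 1 from by ring]
  rfl

lemma bestB_inv (n x y z : Int) (hn : 2 ≤ n) (m : Nat) (hm : (m : Int) ≤ n) :
    (bestB n x y z m).size = (n + 1).toNat ∧
    ∀ k : Nat, (k : Int) ≤ n → (bestB n x y z m).getD k none = pcell x y z m k := by
  induction m with
  | zero =>
    have hinit : bestB n x y z 0 =
        ((Array.replicate (n + 1).toNat (none : Option Int)).setIfInBounds 0 (some 0)).setIfInBounds 1 (some 0) := by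
      unfold bestB
      rw [show (1 + ((0 : Nat) : Int)) = 1 from by norm_num,
          PySem.List.pyRange_one_eq_nil (by norm_num)]
      rfl
    rw [hinit]
    constructor
    · simp
    · intro k hk
      have hlen0 : ((Array.replicate (n + 1).toNat (none : Option Int)).setIfInBounds 0 (some 0)).size = (n + 1).toNat := by simp
      rcases (by omega : k = 0 ∨ k = 1 ∨ 2 ≤ k) with h | h | h
      · subst h
        rw [Array.getD_eq_getD_getElem?, Array.getElem?_setIfInBounds, if_neg (by norm_num),
            Array.getElem?_setIfInBounds, if_pos rfl, if_pos (by simp; omega)]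
        unfold pcell
        rw [if_pos (by omega), cellRec_zero]
        rfl
      · subst h
        rw [Array.getD_eq_getD_getElem?, Array.getElem?_setIfInBounds, if_pos rfl, if_pos (by rw [hlen0]; omega)]
        unfold pcell
        rw [if_pos (by omega), cellRec_one]
        rfl
      · rw [Array.getD_eq_getD_getElem?, Array.getElem?_setIfInBounds, if_neg (by omega),
            Array.getElem?_setIfInBounds, if_neg (by omega), Array.getElem?_replicate]
        unfold pcell
        split_ifs <;> first | rfl | (exfalso; omega)
  | succ m ih =>
    have h1 := ih (by push_cast; omega)
    rw [bestB_succ]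
    have h2 := stepB_getD n x y z m (bestB n x y z m) h1.1 h1.2 (by push_cast at hm ⊢; omega)
    exact h2

lemma cellMitiosis_alt_eq_cellRec (n x y z : Int) (hn : 0 ≤ n) :
    cellMitiosis_alt n x y z = cellRec x y z n.toNat := by
  unfold cellMitiosis_alt
  dsimp only
  by_cases h1 : n ≤ 1
  · rw [if_pos h1]
    rcases (by omega : n.toNat = 0 ∨ n.toNat = 1) with h | h <;> rw [h]
    · rw [cellRec_zero]
    · rw [cellRec_one]
  · rw [if_neg h1]
    have hn2 : 2 ≤ n := by omega
    have hb := bestB_inv n x y z hn2 n.toNat (by omega)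
    have hv : (bestB n x y z n.toNat).getD n.toNat none = some (cellRec x y z n.toNat) := by
      rw [hb.2 n.toNat (by omega)]
      unfold pcell
      rw [if_pos (by omega)]
    have hfold : (PySem.List.pyRange 1 (n + 1) 1).foldl (stepB n x y z)
        (((Array.replicate (n + 1).toNat (none : Option Int)).setIfInBounds 0 (some 0)).setIfInBounds 1 (some 0)) =
        bestB n x y z n.toNat := by
      unfold bestB
      congr 2
      omega
    rw [hfold, hv]

lemma cellMitiosis_eq_cellRec (n x y z : Int) (hn : 0 ≤ n) :
    cellMitiosis n x y z = cellRec x y z n.toNat := by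
  unfold cellMitiosis
  dsimp only
  by_cases h1 : n ≤ 1
  · rcases (by omega : n = 0 ∨ n = 1) with h | h <;> subst h
    · rw [PySem.List.pyRange_one_eq_nil (by norm_num)]
      rw [show ((0 : Int).toNat) = 0 from rfl, cellRec_zero]
      rfl
    · rw [PySem.List.pyRange_one_eq_nil (by norm_num)]
      rw [show ((1 : Int).toNat) = 1 from rfl, cellRec_one]
      rfl
  · have hget := (arrA_get x y z (n - 1).toNat).2 n.toNat (by omega)
    have hfold : (PySem.List.pyRange 2 (n + 1) 1).foldl (stepA x y z)
        ((Array.empty.push 0).push 0) = arrA x y z (n - 1).toNat := by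
      unfold arrA
      congr 2
      omega
    rw [hfold, hget]

-- ===== VERDICT (by name: the statement is the Claim_ definition above) =====
theorem cellMitiosis_spec : Claim_equal_cellMitiosis := by
  intro n x y z _ hpre
  unfold Spec_cellMitiosis
  rw [cellMitiosis_eq_cellRec n x y z hpre, cellMitiosis_alt_eq_cellRec n x y z hpre]
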